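-- pv_equiv track=rewrite | github.com/Freeboardtortoise/BitHavoc | editor.py | find_opcode_start
-- ===== SOURCE A (Python) =====
-- def find_opcode_start(line, cursor_x):
--     bit_positions = [i for i, c in enumerate(line) if c in '01']
--     if not bit_positions:
--         return None
--
--     for i, pos in enumerate(bit_positions):
--         if pos >= cursor_x:
--             bit_index = i
--             break
--     else:
--         bit_index = len(bit_positions) - 1
--
--     start_bit = (bit_index // 8) * 8
--     if start_bit + 1 > len(bit_positions):
--         return None
--     return bit_positions[start_bit]
-- ===== SOURCE B (Python) =====
-- import bisect
--
-- def find_opcode_start(line, cursor_x):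
--     bit_positions = [i for i, c in enumerate(line) if c in '01']
--     if not bit_positions:
--         return None
--     idx = bisect.bisect_left(bit_positions, cursor_x)
--     if idx == len(bit_positions):
--         idx -= 1
--     return bit_positions[(idx // 8) * 8]
-- ===== Notes on version B (the rewrite author's own statement) =====
-- stated objective: idiomatic
-- what changed: The linear for/else scan for the first bit position >= cursor_x is replaced by a binary search (bisect.bisect_left) over the sorted position list, clamped to the last index, and the dead start_bit+1 > len guard is dropped.
import Mathlib
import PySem

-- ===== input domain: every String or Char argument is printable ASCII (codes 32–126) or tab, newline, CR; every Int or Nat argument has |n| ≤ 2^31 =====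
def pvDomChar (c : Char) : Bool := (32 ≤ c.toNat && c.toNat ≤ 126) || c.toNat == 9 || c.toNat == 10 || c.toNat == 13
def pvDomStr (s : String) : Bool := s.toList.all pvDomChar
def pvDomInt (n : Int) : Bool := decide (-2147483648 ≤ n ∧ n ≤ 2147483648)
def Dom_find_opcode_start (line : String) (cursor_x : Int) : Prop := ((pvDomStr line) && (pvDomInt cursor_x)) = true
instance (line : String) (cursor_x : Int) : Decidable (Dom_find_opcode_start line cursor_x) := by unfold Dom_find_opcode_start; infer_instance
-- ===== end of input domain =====

-- B replaces A's linear for/else scan for the first bit position >= cursor_x by a binary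
-- search (bisect_left) over the sorted position list and drops A's dead length guard
-- (objective: idiomatic; same observable behaviour).

-- ===== PORT A =====
def find_opcode_start (line : String) (cursor_x : Int) : Option Int :=
  let bit_positions : List Int :=
    (PySem.List.enumerate line.toList 0).filterMap
      (fun p => if p.2 = '0' ∨ p.2 = '1' then some p.1 else none)
  if bit_positions = [] then none
  else
    let bit_index : Nat :=
      match bit_positions.findIdx? (fun pos => decide (cursor_x ≤ pos)) with
      | some i => i
      | none => bit_positions.length - 1
    let start_bit := (bit_index / 8) * 8
    if bit_positions.length < start_bit + 1 then none
    else PySem.List.pyGet? bit_positions (start_bit : Int)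

-- ===== PORT B =====
-- hand port of bisect.bisect_left (standard lo/hi halving loop); exact on Int lists
def bisectLeft (xs : List Int) (x : Int) (lo hi : Nat) : Nat :=
  if _h : lo < hi then
    let mid := (lo + hi) / 2
    if xs.getD mid 0 < x then bisectLeft xs x (mid + 1) hi
    else bisectLeft xs x lo mid
  else lo
termination_by hi - lo
decreasing_by all_goals omega

def find_opcode_start_alt (line : String) (cursor_x : Int) : Option Int :=
  let bit_positions : List Int :=
    (PySem.List.enumerate line.toList 0).filterMap
      (fun p => if p.2 = '0' ∨ p.2 = '1' then some p.1 else none)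
  if bit_positions = [] then none
  else
    let idx0 := bisectLeft bit_positions cursor_x 0 bit_positions.length
    let idx := if idx0 = bit_positions.length then idx0 - 1 else idx0
    PySem.List.pyGet? bit_positions (((idx / 8) * 8 : Nat) : Int)

-- ===== PRECONDITION & SPEC =====
def Spec_find_opcode_start (line : String) (cursor_x : Int) (out : Option Int) : Prop := out = find_opcode_start_alt line cursor_x
instance (line : String) (cursor_x : Int) (out : Option Int) : Decidable (Spec_find_opcode_start line cursor_x out) := by unfold Spec_find_opcode_start; infer_instance

-- ===== CLAIM (what is proved, stated in full; the proofs are below) =====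
def Claim_equal_find_opcode_start : Prop := ∀ (line : String) (cursor_x : Int), Dom_find_opcode_start line cursor_x → Spec_find_opcode_start line cursor_x (find_opcode_start line cursor_x)

-- ===== LEMMAS AND PROOFS =====

-- the position list is strictly increasing
theorem bitpos_pairwise (line : String) :
    ((PySem.List.enumerate line.toList 0).filterMap
      (fun p => if p.2 = '0' ∨ p.2 = '1' then some p.1 else none)).Pairwise (· < ·) := by
  rw [List.pairwise_filterMap]
  refine (PySem.List.pairwise_lt_enumerate line.toList 0).imp ?_
  intro a b hab x hx y hy
  split at hx <;> split at hy <;> simp_all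

-- the bisect loop never exceeds hi
theorem bisectLeft_le (xs : List Int) (x : Int) :
    ∀ (d lo hi : Nat), hi - lo ≤ d → lo ≤ hi → bisectLeft xs x lo hi ≤ hi := by
  intro d
  induction d with
  | zero =>
    intro lo hi h1 h2
    rw [bisectLeft]
    simp only [show ¬ lo < hi by omega, dif_neg, not_false_iff]
    exact h2
  | succ d ih =>
    intro lo hi h1 h2
    rw [bisectLeft]
    by_cases h : lo < hi
    · simp only [h, dif_pos]
      by_cases hc : xs.getD ((lo + hi) / 2) 0 < x
      · simp only [hc, if_pos]; exact ih _ _ (by omega) (by omega)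
      · simp only [hc, if_neg, not_false_iff]
        exact le_trans (ih _ _ (by omega) (by omega)) (by omega)
    · simp only [h, dif_neg, not_false_iff]; omega

-- invariant of the bisect loop on a strictly increasing list
theorem bisectLeft_inv (xs : List Int) (x : Int)
    (hmono : ∀ i j, i < j → j < xs.length → xs.getD i 0 < xs.getD j 0) :
    ∀ (d lo hi : Nat), hi - lo ≤ d → lo ≤ hi → hi ≤ xs.length →
      (∀ i, i < lo → xs.getD i 0 < x) →
      (∀ i, hi ≤ i → i < xs.length → x ≤ xs.getD i 0) →
      bisectLeft xs x lo hi ≤ hi ∧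
      (∀ i, i < bisectLeft xs x lo hi → xs.getD i 0 < x) ∧
      (bisectLeft xs x lo hi < xs.length → x ≤ xs.getD (bisectLeft xs x lo hi) 0) := by
  intro d
  induction d with
  | zero =>
    intro lo hi h0 hlh hhn hlow hhigh
    have hle : lo = hi := by omega
    rw [bisectLeft]
    simp only [show ¬ lo < hi by omega, dif_neg, not_false_iff]
    exact ⟨le_of_eq hle, hlow, fun h' => hhigh lo (le_of_eq hle.symm) h'⟩
  | succ d ih =>
    intro lo hi h0 hlh hhn hlow hhigh
    rw [bisectLeft]
    by_cases h : lo < hi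
    · simp only [h, dif_pos]
      set mid := (lo + hi) / 2 with hmid
      have hmlt : mid < hi := by omega
      have hmge : lo ≤ mid := by omega
      by_cases hc : xs.getD mid 0 < x
      · simp only [hc, if_pos]
        exact ih (mid + 1) hi (by omega) (by omega) hhn
          (fun i hi' => by
            rcases Nat.lt_succ_iff_lt_or_eq.mp hi' with h' | h'
            · rcases Nat.lt_or_ge i lo with h'' | h''
              · exact hlow i h''
              · exact lt_trans (hmono i mid h' (by omega)) hc
            · simpa [h'] using hc)
          hhigh
      · have hxm : x ≤ xs.getD mid 0 := le_of_not_gt hc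
        simp only [hc, if_neg, not_false_iff]
        obtain ⟨c1, c2, c3⟩ := ih lo mid (by omega) hmge (by omega) hlow
          (fun i hi1 hi2 => by
            rcases Nat.eq_or_lt_of_le hi1 with h' | h'
            · simpa [← h'] using hxm
            · exact le_of_lt (lt_of_le_of_lt hxm (hmono mid i h' hi2)))
        exact ⟨le_trans c1 (le_of_lt hmlt), c2, c3⟩
    · simp only [h, dif_neg, not_false_iff]
      have hle : lo = hi := by omega
      exact ⟨le_of_eq hle, hlow, fun h' => hhigh lo (le_of_eq hle.symm) h'⟩

-- findIdx? finds exactly the least index satisfying the predicate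
theorem findIdx?_of_first (p : Int → Bool) :
    ∀ (xs : List Int) (r : Nat), r < xs.length → p (xs.getD r 0) = true →
      (∀ i, i < r → p (xs.getD i 0) = false) →
      xs.findIdx? p = some r := by
  intro xs
  induction xs with
  | nil => intro r hr; simp at hr
  | cons a t ih =>
    intro r hr hp hlow
    rw [List.findIdx?_cons]
    cases r with
    | zero => simp_all
    | succ r' =>
      have ha : p a = false := by simpa using hlow 0 (Nat.succ_pos _)
      rw [ha]
      simp only [Bool.false_eq_true]
      have := ih r' (by simpa using hr) (by simpa using hp)
        (fun i hi => by simpa using hlow (i + 1) (by omega))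
      simp [this]

-- the two index computations agree
theorem index_agree (xs : List Int) (x : Int)
    (hpw : xs.Pairwise (· < ·)) :
    (match xs.findIdx? (fun pos => decide (x ≤ pos)) with
      | some i => i
      | none => xs.length - 1) =
    (if bisectLeft xs x 0 xs.length = xs.length
      then bisectLeft xs x 0 xs.length - 1
      else bisectLeft xs x 0 xs.length) := by
  have hmono : ∀ i j, i < j → j < xs.length → xs.getD i 0 < xs.getD j 0 := by
    intro i j hij hj
    rw [List.getD_eq_getElem _ _ (by omega), List.getD_eq_getElem _ _ hj]
    exact List.pairwise_iff_getElem.mp hpw i j (by omega) hj hij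
  obtain ⟨hr1, hr2, hr3⟩ := bisectLeft_inv xs x hmono xs.length 0 xs.length (by omega)
    (Nat.zero_le _) (le_refl _) (fun i hi => absurd hi (Nat.not_lt_zero i))
    (fun i h1 h2 => absurd h1 (by omega))
  set r := bisectLeft xs x 0 xs.length with hrdef
  rcases Nat.eq_or_lt_of_le hr1 with heq | hlt
  · -- r = length : every element is < x, findIdx? = none
    have hnone : xs.findIdx? (fun pos => decide (x ≤ pos)) = none := by
      rw [List.findIdx?_eq_none_iff]
      intro y hy
      obtain ⟨i, hi, hig⟩ := List.getElem_of_mem hy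
      have hlt' := hr2 i (by omega)
      rw [List.getD_eq_getElem _ _ hi, hig] at hlt'
      simp only [decide_eq_false_iff_not, not_le]
      exact hlt'
    simp [hnone, heq]
  · -- r < length : findIdx? = some r
    have hsome : xs.findIdx? (fun pos => decide (x ≤ pos)) = some r := by
      apply findIdx?_of_first _ xs r hlt (by simpa using hr3 hlt)
      intro i hi
      simpa [not_le] using hr2 i hi
    simp [hsome, Nat.ne_of_lt hlt]

-- ===== VERDICT (by name: the statement is the Claim_ definition above) =====
theorem find_opcode_start_spec : Claim_equal_find_opcode_start := by
  intro line cursor_x _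
  unfold Spec_find_opcode_start find_opcode_start find_opcode_start_alt
  set xs : List Int := (PySem.List.enumerate line.toList 0).filterMap
      (fun p => if p.2 = '0' ∨ p.2 = '1' then some p.1 else none) with hxs
  by_cases hne : xs = []
  · simp [hne]
  · rw [if_neg hne, if_neg hne]
    have hpw : xs.Pairwise (· < ·) := hxs ▸ bitpos_pairwise line
    have hidx := index_agree xs cursor_x hpw
    simp only [hidx]
    have hrle : bisectLeft xs cursor_x 0 xs.length ≤ xs.length :=
      bisectLeft_le xs cursor_x xs.length 0 xs.length (by omega) (Nat.zero_le _)
    have hnpos : 0 < xs.length := List.length_pos_iff.mpr hne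
    set c := (if bisectLeft xs cursor_x 0 xs.length = xs.length
      then bisectLeft xs cursor_x 0 xs.length - 1
      else bisectLeft xs cursor_x 0 xs.length) with hc
    have hcle : c ≤ xs.length - 1 := by
      rw [hc]; split <;> omega
    have hguard : ¬ (xs.length < c / 8 * 8 + 1) := by
      have h1 : c / 8 * 8 ≤ c := Nat.div_mul_le_self _ _
      omega
    rw [if_neg hguard]
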